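-- pv_equiv track=rewrite | github.com/Moshik21/engram | server/engram/entity_dedup_policy.py | _marked_code_tokens
-- ===== SOURCE A (Python) =====
-- def _marked_code_tokens(tokens: list[str], kinds: list[str]) -> list[bool]:
--     marked = [False] * len(tokens)
--     strong_indices = [
--         idx for idx, kind in enumerate(kinds) if kind in {"strong_num", "strong_mixed"}
--     ]
--     for idx in strong_indices:
--         marked[idx] = True
--
--         left = idx - 1
--         while left >= 0 and kinds[left] == "short_alpha":
--             marked[left] = True
--             left -= 1
--
--         right = idx + 1
--         while right < len(tokens) and kinds[right] == "short_alpha" and len(tokens[right]) <= 2: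
--             marked[right] = True
--             right += 1
--
--     return marked
-- ===== SOURCE B (Python) =====
-- def _marked_code_tokens(tokens: list[str], kinds: list[str]) -> list[bool]:
--     n = len(tokens)
--     m = min(n, len(kinds))
--     left = [False] * n
--     carry = False
--     for i in range(m - 1, -1, -1):
--         k = kinds[i]
--         if k == "strong_num" or k == "strong_mixed":
--             carry = True
--         else:
--             carry = (k == "short_alpha") and carry
--         left[i] = carry
--     out = []
--     carry = False
--     for i in range(m):
--         k = kinds[i]
--         if k == "strong_num" or k == "strong_mixed":
--             carry = True
--         else:
--             carry = (k == "short_alpha") and len(tokens[i]) <= 2 and carry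
--         out.append(left[i] or carry)
--     out.extend([False] * (n - m))
--     return out
-- ===== Notes on version B (the rewrite author's own statement) =====
-- stated objective: alternative
-- what changed: Replaces the per-strong-index expansion loops (re-walking the neighbouring run for every strong token) with two single-pass carry-flag sweeps: a right-to-left sweep propagating marks through short_alpha runs and a left-to-right sweep propagating through short_alpha tokens of length <= 2, OR-ed together; B also tolerates ragged inputs (bounded by the shorter list) on which A raises IndexError.
import Mathlib
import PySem

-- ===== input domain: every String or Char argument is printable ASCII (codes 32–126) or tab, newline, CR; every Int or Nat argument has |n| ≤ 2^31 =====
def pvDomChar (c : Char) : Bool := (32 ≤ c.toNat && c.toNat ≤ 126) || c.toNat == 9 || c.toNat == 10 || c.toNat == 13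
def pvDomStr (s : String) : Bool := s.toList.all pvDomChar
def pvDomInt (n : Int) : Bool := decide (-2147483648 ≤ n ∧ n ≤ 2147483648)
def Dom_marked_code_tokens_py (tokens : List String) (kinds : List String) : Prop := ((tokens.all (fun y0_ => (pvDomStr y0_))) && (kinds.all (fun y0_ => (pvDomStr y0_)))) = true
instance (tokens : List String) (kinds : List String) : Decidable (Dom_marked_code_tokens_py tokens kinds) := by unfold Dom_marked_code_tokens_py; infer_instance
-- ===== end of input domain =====

-- B replaces A's per-strong-index neighbourhood expansion with two linear carry-flag sweeps
-- (right-to-left, then left-to-right) OR-ed together.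

-- ===== PORT A =====
-- while left >= 0 and kinds[left] == "short_alpha": marked[left] = True; left -= 1
def pvMarkLeftA (kinds : List String) (marked : List Bool) (left : Int) : List Bool :=
  if h : 0 ≤ left ∧ PySem.List.pyGetD kinds left "" == "short_alpha" then
    pvMarkLeftA kinds (PySem.List.pySetD marked left true) (left - 1)
  else marked
termination_by (left + 1).toNat
decreasing_by obtain ⟨h0, -⟩ := h; omega

-- while right < len(tokens) and kinds[right] == "short_alpha" and len(tokens[right]) <= 2: …
def pvMarkRightA (tokens : List String) (kinds : List String) (marked : List Bool) (right : Int) : List Bool :=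
  if h : right < (tokens.length : Int) ∧ PySem.List.pyGetD kinds right "" == "short_alpha"
         ∧ PySem.Str.len (PySem.List.pyGetD tokens right "") ≤ 2 then
    pvMarkRightA tokens kinds (PySem.List.pySetD marked right true) (right + 1)
  else marked
termination_by ((tokens.length : Int) - right).toNat
decreasing_by obtain ⟨h0, -⟩ := h; omega

-- body of 'for idx in strong_indices': marked[idx] = True, then the two while loops
def pvAStep (tokens : List String) (kinds : List String) (m : List Bool) (idx : Int) : List Bool :=
  pvMarkRightA tokens kinds
    (pvMarkLeftA kinds (PySem.List.pySetD m idx true) (idx - 1))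
    (idx + 1)

def marked_code_tokens_py (tokens : List String) (kinds : List String) : List Bool :=
  let marked := List.replicate tokens.length false
  let strong_indices :=
    ((PySem.List.enumerate kinds 0).filter
      (fun p => p.2 == "strong_num" || p.2 == "strong_mixed")).map Prod.fst
  strong_indices.foldl (pvAStep tokens kinds) marked

-- ===== PORT B =====
-- right-to-left sweep: carry turns on at strong tokens, held through short_alpha runs
def pvBStep1 (kinds : List String) (st : List Bool × Bool) (i : Int) : List Bool × Bool :=
  let k := PySem.List.pyGetD kinds i ""
  let c := if k == "strong_num" || k == "strong_mixed" then true
           else (k == "short_alpha") && st.2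
  (PySem.List.pySetD st.1 i c, c)

-- left-to-right sweep: carry held only through short_alpha tokens of length <= 2
def pvBStep2 (tokens : List String) (kinds : List String) (leftm : List Bool)
    (st : List Bool × Bool) (i : Int) : List Bool × Bool :=
  let k := PySem.List.pyGetD kinds i ""
  let c := if k == "strong_num" || k == "strong_mixed" then true
           else (k == "short_alpha") && decide (PySem.Str.len (PySem.List.pyGetD tokens i "") ≤ 2) && st.2
  (st.1 ++ [PySem.List.pyGetD leftm i false || c], c)

def marked_code_tokens_py_alt (tokens : List String) (kinds : List String) : List Bool :=
  let n : Int := (tokens.length : Int)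
  let m : Int := min n (kinds.length : Int)
  let p1 := (PySem.List.pyRange (m - 1) (-1) (-1)).foldl (pvBStep1 kinds)
              (List.replicate tokens.length false, false)
  let p2 := (PySem.List.pyRange 0 m 1).foldl (pvBStep2 tokens kinds p1.1) ([], false)
  p2.1 ++ List.replicate (n - m).toNat false

-- ===== PRECONDITION & SPEC =====
-- Pre_ is exactly the domain on which A returns normally; it excludes the inputs where A raises
-- IndexError: a strong kind at an index past the end of tokens, or (kinds shorter than tokens) a
-- strong token whose unbroken run of length-<=2 short_alpha successors reaches the end of kinds.
def Pre_marked_code_tokens_py (tokens : List String) (kinds : List String) : Prop :=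
  ((kinds.drop tokens.length).all (fun k => !(k == "strong_num" || k == "strong_mixed")) = true)
  ∧ (kinds.length < tokens.length →
      ∀ j, j < kinds.length →
        (kinds.getD j "" == "strong_num" || kinds.getD j "" == "strong_mixed") = true →
        ∃ t, t < kinds.length ∧ j < t ∧
          ¬ (kinds.getD t "" = "short_alpha" ∧ PySem.Str.len (tokens.getD t "") ≤ 2))
instance (tokens : List String) (kinds : List String) : Decidable (Pre_marked_code_tokens_py tokens kinds) := by
  unfold Pre_marked_code_tokens_py; infer_instance

def pvWitness_marked_code_tokens_py : List String × List String :=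
  (["ab", "7x", "a", "xyz"], ["short_alpha", "strong_num", "short_alpha", "word"])

def Spec_marked_code_tokens_py (tokens : List String) (kinds : List String) (out : List Bool) : Prop := out = marked_code_tokens_py_alt tokens kinds
instance (tokens : List String) (kinds : List String) (out : List Bool) : Decidable (Spec_marked_code_tokens_py tokens kinds out) := by unfold Spec_marked_code_tokens_py; infer_instance

-- ===== CLAIM (what is proved, stated in full; the proofs are below) =====
def Claim_equal_marked_code_tokens_py : Prop := ∀ (tokens : List String) (kinds : List String), Dom_marked_code_tokens_py tokens kinds → Pre_marked_code_tokens_py tokens kinds → Spec_marked_code_tokens_py tokens kinds (marked_code_tokens_py tokens kinds)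

-- ===== LEMMAS AND PROOFS =====

-- pointwise predicates over absolute indices (getD-based, shared vocabulary of the proofs)
def pvStrongAt (kinds : List String) (j : Nat) : Prop :=
  (kinds.getD j "" == "strong_num" || kinds.getD j "" == "strong_mixed") = true

def pvSAAt (kinds : List String) (j : Nat) : Prop := kinds.getD j "" = "short_alpha"

def pvSA2At (tokens kinds : List String) (j : Nat) : Prop :=
  kinds.getD j "" = "short_alpha" ∧ PySem.Str.len (tokens.getD j "") ≤ 2

def pvRegion (tokens kinds : List String) (i k : Nat) : Prop :=
  i = k
  ∨ (i < k ∧ ∀ t, i ≤ t → t < k → pvSAAt kinds t)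
  ∨ (k < i ∧ (i : Int) < (tokens.length : Int) ∧ ∀ t, k < t → t ≤ i → pvSA2At tokens kinds t)

def pvJs (kinds : List String) : List Nat :=
  (List.range kinds.length).filter (fun k => kinds.getD k "" == "strong_num" || kinds.getD k "" == "strong_mixed")

def pvLflag (kinds : List String) (i : Nat) : Bool :=
  if _h : i < kinds.length then
    let k := kinds.getD i ""
    if k == "strong_num" || k == "strong_mixed" then true
    else (k == "short_alpha") && pvLflag kinds (i + 1)
  else false
termination_by kinds.length - i

def pvRStep (tokens kinds : List String) (i : Nat) (c : Bool) : Bool :=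
  let k := kinds.getD i ""
  if k == "strong_num" || k == "strong_mixed" then true
  else (k == "short_alpha") && decide (PySem.Str.len (tokens.getD i "") ≤ 2) && c

def pvRflag (tokens kinds : List String) : Nat → Bool
  | 0 => pvRStep tokens kinds 0 false
  | i + 1 => pvRStep tokens kinds (i + 1) (pvRflag tokens kinds i)

def pvRCarry (tokens kinds : List String) : Nat → Bool
  | 0 => false
  | m + 1 => pvRflag tokens kinds m

theorem pvStrongAt_lt (kinds : List String) (j : Nat) (h : pvStrongAt kinds j) : j < kinds.length := by
  by_contra hj
  push Not at hj
  unfold pvStrongAt at h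
  rw [List.getD_eq_default _ _ hj] at h
  simp at h

theorem pvGetSet (l : List Bool) (i j : Nat) (a : Bool) :
    (l.set i a)[j]? = if i = j ∧ i < l.length then some a else l[j]? := by
  rw [List.getElem?_set]
  split_ifs with h1 h2 h3 <;> simp_all <;> omega

theorem pvMarkLeftA_length (kinds : List String) (m : List Bool) (l : Int) :
    (pvMarkLeftA kinds m l).length = m.length := by
  fun_induction pvMarkLeftA with
  | case1 m l h ih => rw [ih]; simp
  | case2 => rfl

theorem pvMarkLeftA_get_of_not (kinds : List String) (m : List Bool) (l : Int) (i : Nat)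
    (h : ¬ ((i : Int) ≤ l ∧ ∀ k : Nat, i ≤ k → (k : Int) ≤ l → pvSAAt kinds k)) :
    (pvMarkLeftA kinds m l)[i]? = m[i]? := by
  fun_induction pvMarkLeftA with
  | case1 m l hc ih =>
    obtain ⟨h0, hsa⟩ := hc
    rw [PySem.List.pyGetD_of_nonneg _ _ h0] at hsa
    have hSAl : pvSAAt kinds l.toNat := by
      unfold pvSAAt; exact eq_of_beq hsa
    have h' : ¬ ((i : Int) ≤ l - 1 ∧ ∀ k : Nat, i ≤ k → (k : Int) ≤ l - 1 → pvSAAt kinds k) := by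
      rintro ⟨ha, hb⟩
      apply h
      refine ⟨by omega, ?_⟩
      intro k hk1 hk2
      by_cases hkl : (k : Int) ≤ l - 1
      · exact hb k hk1 hkl
      · have : k = l.toNat := by omega
        rwa [this]
    rw [ih h']
    rw [PySem.List.pySetD_of_nonneg _ _ h0, pvGetSet]
    rw [if_neg]
    rintro ⟨heq, -⟩
    apply h
    refine ⟨by omega, ?_⟩
    intro k hk1 hk2
    have : k = l.toNat := by omega
    rwa [this]
  | case2 => rfl

theorem pvMarkLeftA_get_of (kinds : List String) (m : List Bool) (l : Int) (i : Nat)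
    (hi : i < m.length) (h1 : (i : Int) ≤ l)
    (h2 : ∀ k : Nat, i ≤ k → (k : Int) ≤ l → pvSAAt kinds k) :
    (pvMarkLeftA kinds m l)[i]? = some true := by
  fun_induction pvMarkLeftA with
  | case1 m l hc ih =>
    obtain ⟨h0, -⟩ := hc
    by_cases hil : (i : Int) ≤ l - 1
    · exact ih (by simpa using hi) hil (fun k hk1 hk2 => h2 k hk1 (by omega))
    · have hieq : l.toNat = i := by omega
      rw [pvMarkLeftA_get_of_not]
      · rw [PySem.List.pySetD_of_nonneg _ _ h0, pvGetSet, if_pos ⟨hieq, hieq ▸ hi⟩]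
      · rintro ⟨ha, -⟩; omega
  | case2 m l hc =>
    exfalso
    apply hc
    have h0 : (0:Int) ≤ l := by omega
    have hsa := h2 l.toNat (by omega) (by omega)
    unfold pvSAAt at hsa
    refine ⟨h0, ?_⟩
    rw [PySem.List.pyGetD_of_nonneg _ _ h0, hsa]
    rfl

theorem pvMarkRightA_length (tokens kinds : List String) (m : List Bool) (r : Int) :
    (pvMarkRightA tokens kinds m r).length = m.length := by
  fun_induction pvMarkRightA with
  | case1 m r h ih => rw [ih]; simp
  | case2 => rfl

theorem pvMarkRightA_get_of_not (tokens kinds : List String) (m : List Bool) (r : Int) (i : Nat)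
    (hr : 0 ≤ r)
    (h : ¬ (r ≤ (i : Int) ∧ (i : Int) < (tokens.length : Int) ∧
            ∀ k : Nat, r ≤ (k : Int) → k ≤ i → pvSA2At tokens kinds k)) :
    (pvMarkRightA tokens kinds m r)[i]? = m[i]? := by
  fun_induction pvMarkRightA with
  | case1 m r hc ih =>
    obtain ⟨hlt, hsa, hln⟩ := hc
    rw [PySem.List.pyGetD_of_nonneg _ _ hr] at hsa hln
    have hSA2 : pvSA2At tokens kinds r.toNat := ⟨eq_of_beq hsa, hln⟩
    have h' : ¬ (r + 1 ≤ (i : Int) ∧ (i : Int) < (tokens.length : Int) ∧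
        ∀ k : Nat, r + 1 ≤ (k : Int) → k ≤ i → pvSA2At tokens kinds k) := by
      rintro ⟨ha, hb, hcn⟩
      apply h
      refine ⟨by omega, hb, ?_⟩
      intro k hk1 hk2
      by_cases hkr : r + 1 ≤ (k : Int)
      · exact hcn k hkr hk2
      · have : k = r.toNat := by omega
        rwa [this]
    rw [ih (by omega) h']
    rw [PySem.List.pySetD_of_nonneg _ _ hr, pvGetSet, if_neg]
    rintro ⟨heq, -⟩
    apply h
    refine ⟨by omega, by omega, ?_⟩
    intro k hk1 hk2
    have : k = r.toNat := by omega
    rwa [this]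
  | case2 => rfl

theorem pvMarkRightA_get_of (tokens kinds : List String) (m : List Bool) (r : Int) (i : Nat)
    (hr : 0 ≤ r) (hi : i < m.length) (h1 : r ≤ (i : Int)) (h2 : (i : Int) < (tokens.length : Int))
    (h3 : ∀ k : Nat, r ≤ (k : Int) → k ≤ i → pvSA2At tokens kinds k) :
    (pvMarkRightA tokens kinds m r)[i]? = some true := by
  fun_induction pvMarkRightA with
  | case1 m r hc ih =>
    by_cases hir : r + 1 ≤ (i : Int)
    · exact ih (by omega) (by simpa using hi) hir (fun k hk1 hk2 => h3 k (by omega) hk2)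
    · have hieq : r.toNat = i := by omega
      rw [pvMarkRightA_get_of_not _ _ _ _ _ (by omega)]
      · rw [PySem.List.pySetD_of_nonneg _ _ hr, pvGetSet, if_pos ⟨hieq, hieq ▸ hi⟩]
      · rintro ⟨ha, -⟩; omega
  | case2 m r hc =>
    exfalso
    apply hc
    have hsa2 := h3 r.toNat (by omega) (by omega)
    obtain ⟨ha, hb⟩ := hsa2
    refine ⟨by omega, ?_, ?_⟩
    · rw [PySem.List.pyGetD_of_nonneg _ _ hr, ha]; rfl
    · rwa [PySem.List.pyGetD_of_nonneg _ _ hr]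

theorem pvAStep_length (tokens kinds : List String) (m : List Bool) (j : Int) :
    (pvAStep tokens kinds m j).length = m.length := by
  unfold pvAStep
  rw [pvMarkRightA_length, pvMarkLeftA_length]
  simp

theorem pvAStep_get_of_not (tokens kinds : List String) (m : List Bool) (k i : Nat)
    (h : ¬ pvRegion tokens kinds i k) :
    (pvAStep tokens kinds m (k : Int))[i]? = m[i]? := by
  have hne : i ≠ k := fun he => h (Or.inl he)
  have hL : ¬ (i < k ∧ ∀ t, i ≤ t → t < k → pvSAAt kinds t) :=
    fun hx => h (Or.inr (Or.inl hx))
  have hR : ¬ (k < i ∧ (i : Int) < (tokens.length : Int) ∧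
      ∀ t, k < t → t ≤ i → pvSA2At tokens kinds t) :=
    fun hx => h (Or.inr (Or.inr hx))
  unfold pvAStep
  rw [pvMarkRightA_get_of_not tokens kinds _ ((k:Int)+1) i (by omega)]
  · rw [pvMarkLeftA_get_of_not]
    · rw [PySem.List.pySetD_of_nonneg _ _ (Int.natCast_nonneg k), pvGetSet, if_neg]
      rintro ⟨heq, -⟩
      exact hne (by omega)
    · rintro ⟨ha, hb⟩
      exact hL ⟨by omega, fun t ht1 ht2 => hb t ht1 (by omega)⟩
  · rintro ⟨ha, hb, hc⟩
    exact hR ⟨by omega, hb, fun t ht1 ht2 => hc t (by omega) ht2⟩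

theorem pvAStep_get_of (tokens kinds : List String) (m : List Bool) (k i : Nat)
    (hi : i < m.length) (h : pvRegion tokens kinds i k) :
    (pvAStep tokens kinds m (k : Int))[i]? = some true := by
  unfold pvAStep
  rcases h with heq | ⟨hik, hchain⟩ | ⟨hki, hlen, hchain⟩
  · subst heq
    rw [pvMarkRightA_get_of_not tokens kinds _ ((i:Int)+1) i (by omega) (by rintro ⟨ha, -⟩; omega)]
    rw [pvMarkLeftA_get_of_not _ _ _ _ (by rintro ⟨ha, -⟩; omega)]
    rw [PySem.List.pySetD_of_nonneg _ _ (Int.natCast_nonneg i), pvGetSet,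
      if_pos ⟨by omega, by simpa using hi⟩]
  · rw [pvMarkRightA_get_of_not tokens kinds _ ((k:Int)+1) i (by omega) (by rintro ⟨ha, -⟩; omega)]
    rw [pvMarkLeftA_get_of]
    · simpa using hi
    · omega
    · intro t ht1 ht2
      exact hchain t ht1 (by omega)
  · rw [pvMarkRightA_get_of tokens kinds _ ((k:Int)+1) i (by omega) _ (by omega) hlen
      (fun t ht1 ht2 => hchain t (by omega) ht2)]
    rw [pvMarkLeftA_length]
    simpa using hi

theorem pvAStep_preserve (tokens kinds : List String) (m : List Bool) (k : Nat) (i : Nat)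
    (h : m[i]? = some true) :
    (pvAStep tokens kinds m (k : Int))[i]? = some true := by
  by_cases hr : pvRegion tokens kinds i k
  · exact pvAStep_get_of tokens kinds m k i (by
      have := List.getElem?_eq_some_iff.mp h
      exact this.1) hr
  · rw [pvAStep_get_of_not tokens kinds m k i hr, h]

theorem pvFold_length (tokens kinds : List String) (js : List Nat) (m : List Bool) :
    ((js.map (Nat.cast : Nat → Int)).foldl (pvAStep tokens kinds) m).length = m.length := by
  induction js generalizing m with
  | nil => rfl
  | cons k js ih => simp only [List.map_cons, List.foldl_cons]; rw [ih, pvAStep_length]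

theorem pvFold_get_of_not (tokens kinds : List String) (js : List Nat) (m : List Bool) (i : Nat)
    (h : ∀ k ∈ js, ¬ pvRegion tokens kinds i k) :
    ((js.map (Nat.cast : Nat → Int)).foldl (pvAStep tokens kinds) m)[i]? = m[i]? := by
  induction js generalizing m with
  | nil => rfl
  | cons k js ih =>
    simp only [List.map_cons, List.foldl_cons]
    rw [ih _ (fun k' hk' => h k' (List.mem_cons_of_mem _ hk')),
      pvAStep_get_of_not _ _ _ _ _ (h k (List.mem_cons_self))]

theorem pvFold_preserve (tokens kinds : List String) (js : List Nat) (m : List Bool) (i : Nat)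
    (h : m[i]? = some true) :
    ((js.map (Nat.cast : Nat → Int)).foldl (pvAStep tokens kinds) m)[i]? = some true := by
  induction js generalizing m with
  | nil => exact h
  | cons k js ih =>
    simp only [List.map_cons, List.foldl_cons]
    exact ih _ (pvAStep_preserve _ _ _ _ _ h)

theorem pvFold_get_of (tokens kinds : List String) (js : List Nat) (m : List Bool) (i : Nat)
    (hi : i < m.length) (h : ∃ k ∈ js, pvRegion tokens kinds i k) :
    ((js.map (Nat.cast : Nat → Int)).foldl (pvAStep tokens kinds) m)[i]? = some true := by
  induction js generalizing m with
  | nil => simp at h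
  | cons k js ih =>
    simp only [List.map_cons, List.foldl_cons]
    by_cases hk : pvRegion tokens kinds i k
    · exact pvFold_preserve _ _ _ _ _ (pvAStep_get_of _ _ _ _ _ hi hk)
    · obtain ⟨k', hk', hr'⟩ := h
      rcases List.mem_cons.mp hk' with rfl | hmem
      · exact absurd hr' hk
      · exact ih _ (by rw [pvAStep_length]; exact hi) ⟨k', hmem, hr'⟩

theorem pv_mem_pvJs (kinds : List String) (k : Nat) :
    k ∈ pvJs kinds ↔ k < kinds.length ∧ pvStrongAt kinds k := by
  unfold pvJs pvStrongAt
  simp [List.mem_filter]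

theorem pv_strong_indices_eq (kinds : List String) :
    ((PySem.List.enumerate kinds 0).filter
      (fun p => p.2 == "strong_num" || p.2 == "strong_mixed")).map Prod.fst
    = (pvJs kinds).map (Nat.cast : Nat → Int) := by
  rw [PySem.List.enumerate_eq_map_pyRange (d := "")]
  simp only [PySem.List.len_eq]
  rw [PySem.List.pyRange_zero_natCast]
  unfold pvJs
  simp [List.filter_map, List.map_map, Function.comp_def]

theorem pvPass1 (kinds : List String) (m : Nat) (arr : List Bool)
    (hm : m ≤ arr.length) (hk : m ≤ kinds.length) :
    ((PySem.List.pyRange ((m : Int) - 1) (-1) (-1)).foldl (pvBStep1 kinds) (arr, pvLflag kinds m)).1.length = arr.length ∧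
      ∀ j : Nat, ((PySem.List.pyRange ((m : Int) - 1) (-1) (-1)).foldl (pvBStep1 kinds) (arr, pvLflag kinds m)).1[j]? = if j < m then some (pvLflag kinds j) else arr[j]? := by
  induction m generalizing arr with
  | zero =>
    rw [PySem.List.pyRange_neg_one_eq_nil (by omega)]
    simp
  | succ m ih =>
    have hc : PySem.List.pyRange (((m + 1 : Nat) : Int) - 1) (-1) (-1)
        = ((m : Nat) : Int) :: PySem.List.pyRange (((m : Nat) : Int) - 1) (-1) (-1) := by
      have := PySem.List.pyRange_neg_one_cons (a := ((m : Nat) : Int)) (b := -1) (by omega)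
      push_cast
      convert this using 2
      omega
    rw [hc]
    simp only [List.foldl_cons]
    have hstep : pvBStep1 kinds (arr, pvLflag kinds (m + 1)) ((m : Nat) : Int)
        = (PySem.List.pySetD arr ((m : Nat) : Int) (pvLflag kinds m), pvLflag kinds m) := by
      unfold pvBStep1
      rw [show pvLflag kinds m = (if (kinds.getD m "" == "strong_num" || kinds.getD m "" == "strong_mixed") then true
            else (kinds.getD m "" == "short_alpha") && pvLflag kinds (m + 1)) by
        rw [pvLflag]; rw [dif_pos (by omega)]]
      simp [PySem.List.pyGetD_natCast]
    rw [hstep]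
    rw [PySem.List.pySetD_of_nonneg _ _ (Int.natCast_nonneg m)]
    simp only [Int.toNat_natCast]
    obtain ⟨ihl, ihg⟩ := ih (arr.set m (pvLflag kinds m)) (by simpa using by omega) (by omega)
    refine ⟨by simpa using ihl, ?_⟩
    intro j
    rw [ihg j]
    by_cases hjm : j < m
    · rw [if_pos hjm, if_pos (by omega)]
    · rw [if_neg hjm, pvGetSet]
      by_cases hje : j = m
      · subst hje
        rw [if_pos ⟨rfl, by omega⟩, if_pos (by omega)]
      · rw [if_neg (by rintro ⟨h1, -⟩; omega), if_neg (by omega)]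

theorem pvPass2 (tokens kinds : List String) (leftm : List Bool) (m : Nat) :
    (PySem.List.pyRange 0 (m : Int) 1).foldl (pvBStep2 tokens kinds leftm) ([], false)
    = ((List.range m).map (fun (j : Nat) => PySem.List.pyGetD leftm ((j : Int)) false || pvRflag tokens kinds j),
       pvRCarry tokens kinds m) := by
  induction m with
  | zero =>
    rw [PySem.List.pyRange_one_eq_nil (by omega)]
    simp [pvRCarry]
  | succ m ih =>
    have hsplit : PySem.List.pyRange 0 ((m + 1 : Nat) : Int) 1
        = PySem.List.pyRange 0 ((m : Nat) : Int) 1 ++ [((m : Nat) : Int)] := by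
      have := PySem.List.pyRange_one_succ_right (a := 0) (b := ((m : Nat) : Int)) (by omega)
      push_cast
      convert this using 2
    rw [hsplit, List.foldl_append, ih]
    have hc : (if (kinds.getD m "" == "strong_num" || kinds.getD m "" == "strong_mixed") then true
          else (kinds.getD m "" == "short_alpha") && decide (PySem.Str.len (tokens.getD m "") ≤ 2)
            && pvRCarry tokens kinds m)
        = pvRflag tokens kinds m := by
      match m with
      | 0 => rfl
      | m' + 1 => rfl
    have hstep : pvBStep2 tokens kinds leftm
        (((List.range m).map (fun (j : Nat) => PySem.List.pyGetD leftm ((j : Int)) false || pvRflag tokens kinds j)),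
         pvRCarry tokens kinds m) ((m : Nat) : Int)
        = (((List.range m).map (fun (j : Nat) => PySem.List.pyGetD leftm ((j : Int)) false || pvRflag tokens kinds j))
            ++ [PySem.List.pyGetD leftm ((m : Nat) : Int) false || pvRflag tokens kinds m],
           pvRflag tokens kinds m) := by
      unfold pvBStep2
      simp only [PySem.List.pyGetD_natCast]
      rw [hc]
    rw [List.foldl_cons, List.foldl_nil, hstep, List.range_succ, List.map_append]
    rfl

theorem pvAlt_eq_map (tokens kinds : List String)
    (hf : pvLflag kinds (min tokens.length kinds.length) = false) :
    marked_code_tokens_py_alt tokens kinds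
    = (List.range (min tokens.length kinds.length)).map
        (fun j => pvLflag kinds j || pvRflag tokens kinds j)
      ++ List.replicate (tokens.length - min tokens.length kinds.length) false := by
  simp only [marked_code_tokens_py_alt]
  have hmin : min (tokens.length : Int) (kinds.length : Int) = ((min tokens.length kinds.length : Nat) : Int) := by
    omega
  rw [hmin]
  have h1 := pvPass1 kinds (min tokens.length kinds.length) (List.replicate tokens.length false)
    (by simp) (by omega)
  rw [hf] at h1
  obtain ⟨h1l, h1g⟩ := h1
  rw [pvPass2 tokens kinds _ (min tokens.length kinds.length)]
  simp only
  congr 1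
  · apply List.map_congr_left
    intro j hj
    rw [List.mem_range] at hj
    have := h1g j
    rw [if_pos hj] at this
    rw [PySem.List.pyGetD_natCast]
    rw [List.getD_eq_getElem?_getD, this]
    rfl
  · congr 1
    omega

theorem pvLflag_iff (kinds : List String) (i : Nat) :
    pvLflag kinds i = true ↔
      ∃ j, i ≤ j ∧ pvStrongAt kinds j ∧ ∀ k, i ≤ k → k < j → pvSAAt kinds k := by
  fun_induction pvLflag with
  | case1 i h k hs =>
    simp only [true_iff]
    exact ⟨i, le_rfl, hs, fun t ht1 ht2 => absurd ht2 (by omega)⟩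
  | case2 i h k hs ih =>
    constructor
    · intro hb
      rw [Bool.and_eq_true] at hb
      obtain ⟨hsa, hfl⟩ := hb
      obtain ⟨j, hj1, hj2, hj3⟩ := ih.mp hfl
      refine ⟨j, by omega, hj2, ?_⟩
      intro t ht1 ht2
      by_cases hti : t = i
      · subst hti
        exact eq_of_beq hsa
      · exact hj3 t (by omega) ht2
    · rintro ⟨j, hj1, hj2, hj3⟩
      have hji : i < j := by
        rcases Nat.lt_or_ge i j with hlt | hge
        · exact hlt
        · exfalso
          have : j = i := by omega
          subst this
          exact hs hj2
      rw [Bool.and_eq_true]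
      refine ⟨?_, ih.mpr ⟨j, by omega, hj2, fun t ht1 ht2 => hj3 t (by omega) ht2⟩⟩
      have hsr := hj3 i le_rfl hji
      unfold pvSAAt at hsr
      show (kinds.getD i "" == "short_alpha") = true
      rw [hsr]
      rfl
  | case3 i h =>
    simp only [Bool.false_eq_true, false_iff]
    rintro ⟨j, hj1, hj2, -⟩
    have := pvStrongAt_lt kinds j hj2
    omega

theorem pvRStep_iff (tokens kinds : List String) (i : Nat) (c : Bool) :
    pvRStep tokens kinds i c = true ↔
      pvStrongAt kinds i ∨ (pvSA2At tokens kinds i ∧ c = true) := by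
  unfold pvRStep pvStrongAt pvSA2At
  simp only
  split_ifs with hsk
  · simp only [true_iff]
    exact Or.inl hsk
  · simp only [Bool.and_eq_true, decide_eq_true_eq]
    constructor
    · rintro ⟨⟨hsa, hln⟩, hc⟩
      exact Or.inr ⟨⟨eq_of_beq hsa, hln⟩, hc⟩
    · rintro (hst | ⟨⟨hsa, hln⟩, hc⟩)
      · exact absurd hst hsk
      · exact ⟨⟨by rw [hsa]; rfl, hln⟩, hc⟩

theorem pvRflag_iff (tokens kinds : List String) (i : Nat) :
    pvRflag tokens kinds i = true ↔
      ∃ j, j ≤ i ∧ pvStrongAt kinds j ∧ ∀ k, j < k → k ≤ i → pvSA2At tokens kinds k := by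
  induction i with
  | zero =>
    show pvRStep tokens kinds 0 false = true ↔ _
    rw [pvRStep_iff]
    constructor
    · rintro (hst | ⟨-, hfalse⟩)
      · exact ⟨0, le_rfl, hst, fun k hk1 hk2 => absurd (by omega : k = 0) (by omega)⟩
      · simp at hfalse
    · rintro ⟨j, hj1, hj2, -⟩
      have : j = 0 := by omega
      subst this
      exact Or.inl hj2
  | succ i ih =>
    show pvRStep tokens kinds (i + 1) (pvRflag tokens kinds i) = true ↔ _
    rw [pvRStep_iff]
    constructor
    · rintro (hst | ⟨hsa2, hfl⟩)
      · exact ⟨i + 1, le_rfl, hst, fun k hk1 hk2 => absurd hk1 (by omega)⟩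
      · obtain ⟨j, hj1, hj2, hj3⟩ := ih.mp hfl
        refine ⟨j, by omega, hj2, ?_⟩
        intro t ht1 ht2
        by_cases hti : t = i + 1
        · subst hti; exact hsa2
        · exact hj3 t ht1 (by omega)
    · rintro ⟨j, hj1, hj2, hj3⟩
      by_cases hje : j = i + 1
      · subst hje; exact Or.inl hj2
      · refine Or.inr ⟨hj3 (i + 1) (by omega) le_rfl, ih.mpr ⟨j, by omega, hj2, fun t ht1 ht2 => hj3 t ht1 (by omega)⟩⟩

theorem pvExists_region_iff (tokens kinds : List String) (i : Nat)
    (hi : i < tokens.length) :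
    (∃ k ∈ pvJs kinds, pvRegion tokens kinds i k) ↔
      (pvLflag kinds i = true ∨ pvRflag tokens kinds i = true) := by
  constructor
  · rintro ⟨k, hk, hreg⟩
    obtain ⟨hklen, hkst⟩ := (pv_mem_pvJs kinds k).mp hk
    rcases hreg with heq | ⟨hik, hchain⟩ | ⟨hki, -, hchain⟩
    · subst heq
      exact Or.inl ((pvLflag_iff kinds i).mpr ⟨i, le_rfl, hkst, fun t ht1 ht2 => absurd ht2 (by omega)⟩)
    · exact Or.inl ((pvLflag_iff kinds i).mpr ⟨k, by omega, hkst, hchain⟩)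
    · exact Or.inr ((pvRflag_iff tokens kinds i).mpr ⟨k, by omega, hkst, hchain⟩)
  · rintro (hfl | hfl)
    · obtain ⟨j, hij, hst, hchain⟩ := (pvLflag_iff kinds i).mp hfl
      refine ⟨j, (pv_mem_pvJs kinds j).mpr ⟨pvStrongAt_lt kinds j hst, hst⟩, ?_⟩
      by_cases hje : i = j
      · exact Or.inl hje
      · exact Or.inr (Or.inl ⟨by omega, hchain⟩)
    · obtain ⟨j, hji, hst, hchain⟩ := (pvRflag_iff tokens kinds i).mp hfl
      refine ⟨j, (pv_mem_pvJs kinds j).mpr ⟨pvStrongAt_lt kinds j hst, hst⟩, ?_⟩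
      by_cases hje : i = j
      · exact Or.inl hje
      · exact Or.inr (Or.inr ⟨by omega, by omega, hchain⟩)

theorem pvP1_no_strong (tokens kinds : List String)
    (hp1 : (kinds.drop tokens.length).all (fun k => !(k == "strong_num" || k == "strong_mixed")) = true) :
    ∀ j, tokens.length ≤ j → ¬ pvStrongAt kinds j := by
  intro j hj hst
  have hjk : j < kinds.length := pvStrongAt_lt kinds j hst
  have hjd : j - tokens.length < (kinds.drop tokens.length).length := by
    rw [List.length_drop]; omega
  have hget : kinds.getD j "" = (kinds.drop tokens.length)[j - tokens.length]'hjd := by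
    rw [List.getD_eq_getElem _ _ hjk, List.getElem_drop]
    congr 1
    omega
  have hmem : (kinds.drop tokens.length)[j - tokens.length]'hjd ∈ kinds.drop tokens.length :=
    List.getElem_mem hjd
  have := List.all_eq_true.mp hp1 _ hmem
  unfold pvStrongAt at hst
  rw [hget] at hst
  rw [hst] at this
  simp at this

theorem pvLflag_min_false (tokens kinds : List String)
    (hp1 : (kinds.drop tokens.length).all (fun k => !(k == "strong_num" || k == "strong_mixed")) = true) :
    pvLflag kinds (min tokens.length kinds.length) = false := by
  rcases Bool.eq_false_or_eq_true (pvLflag kinds (min tokens.length kinds.length)) with h | h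
  · obtain ⟨j, hj1, hj2, -⟩ := (pvLflag_iff kinds _).mp h
    have hjk : j < kinds.length := pvStrongAt_lt kinds j hj2
    exact absurd hj2 (pvP1_no_strong tokens kinds hp1 j (by omega))
  · exact h

theorem pvSAAt_oob (kinds : List String) (i : Nat) (h : kinds.length ≤ i) : ¬ pvSAAt kinds i := by
  unfold pvSAAt
  rw [List.getD_eq_default _ _ h]
  intro hc
  exact absurd hc (by decide)

theorem pvMain (tokens kinds : List String)
    (hp1 : (kinds.drop tokens.length).all (fun k => !(k == "strong_num" || k == "strong_mixed")) = true) :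
    marked_code_tokens_py tokens kinds = marked_code_tokens_py_alt tokens kinds := by
  rw [pvAlt_eq_map tokens kinds (pvLflag_min_false tokens kinds hp1)]
  simp only [marked_code_tokens_py]
  rw [pv_strong_indices_eq]
  apply List.ext_getElem?
  intro i
  have hrhs : ((List.range (min tokens.length kinds.length)).map
      (fun j => pvLflag kinds j || pvRflag tokens kinds j)
      ++ List.replicate (tokens.length - min tokens.length kinds.length) false)[i]?
      = if i < min tokens.length kinds.length then some (pvLflag kinds i || pvRflag tokens kinds i)
        else if i < tokens.length then some false else none := by
    by_cases hi : i < min tokens.length kinds.length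
    · rw [List.getElem?_append_left (by simpa using hi), List.getElem?_map,
        List.getElem?_range hi, if_pos hi]
      rfl
    · rw [List.getElem?_append_right (by simpa using by omega), if_neg hi]
      simp only [List.length_map, List.length_range]
      by_cases hin : i < tokens.length
      · rw [List.getElem?_replicate, if_pos (by omega), if_pos hin]
      · rw [if_neg hin]
        apply List.getElem?_eq_none
        simp only [List.length_replicate]
        omega
  rw [hrhs]
  by_cases hi : i < min tokens.length kinds.length
  · rw [if_pos hi]
    have hit : i < tokens.length := by omega
    by_cases hE : ∃ k ∈ pvJs kinds, pvRegion tokens kinds i k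
    · rw [pvFold_get_of tokens kinds _ _ _ (by simpa using hit) hE]
      rcases (pvExists_region_iff tokens kinds i hit).mp hE with hf | hf <;> rw [hf] <;> simp
    · rw [pvFold_get_of_not tokens kinds _ _ _ (fun k hk hr => hE ⟨k, hk, hr⟩)]
      have hL : pvLflag kinds i = false := by
        rcases Bool.eq_false_or_eq_true (pvLflag kinds i) with h | h
        · exact absurd ((pvExists_region_iff tokens kinds i hit).mpr (Or.inl h)) hE
        · exact h
      have hR : pvRflag tokens kinds i = false := by
        rcases Bool.eq_false_or_eq_true (pvRflag tokens kinds i) with h | h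
        · exact absurd ((pvExists_region_iff tokens kinds i hit).mpr (Or.inr h)) hE
        · exact h
      rw [List.getElem?_replicate, if_pos hit, hL, hR]
      rfl
  · rw [if_neg hi]
    by_cases hin : i < tokens.length
    · rw [if_pos hin]
      -- here kinds is shorter than tokens and i is past the end of kinds
      have hik : kinds.length ≤ i := by omega
      have hnE : ¬ ∃ k ∈ pvJs kinds, pvRegion tokens kinds i k := by
        rintro ⟨k, hk, hreg⟩
        obtain ⟨hklen, -⟩ := (pv_mem_pvJs kinds k).mp hk
        rcases hreg with heq | ⟨hlt, -⟩ | ⟨-, -, hchain⟩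
        · omega
        · omega
        · exact absurd (hchain i (by omega) le_rfl).1 (by
            have := pvSAAt_oob kinds i hik
            unfold pvSAAt at this
            exact this)
      rw [pvFold_get_of_not tokens kinds _ _ _ (fun k hk hr => hnE ⟨k, hk, hr⟩)]
      rw [List.getElem?_replicate, if_pos hin]
    · rw [if_neg hin]
      apply List.getElem?_eq_none
      rw [pvFold_length]
      simpa using by omega

-- ===== VERDICT (by name: the statement is the Claim_ definition above) =====
theorem marked_code_tokens_py_spec : Claim_equal_marked_code_tokens_py := by
  intro tokens kinds _ hpre
  unfold Spec_marked_code_tokens_py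
  exact pvMain tokens kinds hpre.1
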